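-- pv_equiv track=rewrite | github.com/shogowarrior/interview-prep | src/python/Search/revenue_milestones.py | get_milestone_days
-- ===== SOURCE A (Python) =====
-- def get_milestone_days(revenues, milestones):
--     result = [0] * len(milestones)
--
--     # Sort milestones with their original indices, so we can map back results later
--     # Each entry is (milestone_value, original_index)
--     sorted_milestones = sorted([(m, i) for i, m in enumerate(milestones)])
--
--     index = 0
--     sum = 0
--     for day, revenue in enumerate(revenues):
--         sum += revenue  # Add today's revenue to the total
--
--         # Check if we've reached or surpassed any milestones
--         while (index < len(sorted_milestones) and
--                sum >= sorted_milestones[index][0]):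
--
--             # Get the milestone and its original index
--             # Record the day (1-indexed) this milestone was met
--             result[sorted_milestones[index][1]] = day + 1
--
--             # Move to the next milestone
--             index += 1
--
--     return result
-- ===== SOURCE B (Python) =====
-- def get_milestone_days(revenues, milestones):
--     # best[k] = running maximum of the prefix sums of the first k+1 days (non-decreasing),
--     # so the first day a milestone m is reached is the first index with best[index] >= m,
--     # found by binary search; never reached (or no days) -> 0.
--     best = []
--     s = 0
--     hi = None
--     for r in revenues:
--         s += r
--         if hi is None or s > hi:
--             hi = s
--         best.append(hi)
--     result = []
--     for m in milestones:
--         if not best or best[-1] < m: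
--             result.append(0)
--         else:
--             lo, up = 0, len(best) - 1
--             while lo < up:
--                 mid = (lo + up) // 2
--                 if best[mid] >= m:
--                     up = mid
--                 else:
--                     lo = mid + 1
--             result.append(lo + 1)
--     return result
-- ===== Notes on version B (the rewrite author's own statement) =====
-- stated objective: alternative
-- what changed: Replaces the sort of (value,index) pairs and the shared monotone milestone pointer with a running-max prefix-sum envelope (monotone even for negative revenues) and an independent binary search per milestone.
import Mathlib
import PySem

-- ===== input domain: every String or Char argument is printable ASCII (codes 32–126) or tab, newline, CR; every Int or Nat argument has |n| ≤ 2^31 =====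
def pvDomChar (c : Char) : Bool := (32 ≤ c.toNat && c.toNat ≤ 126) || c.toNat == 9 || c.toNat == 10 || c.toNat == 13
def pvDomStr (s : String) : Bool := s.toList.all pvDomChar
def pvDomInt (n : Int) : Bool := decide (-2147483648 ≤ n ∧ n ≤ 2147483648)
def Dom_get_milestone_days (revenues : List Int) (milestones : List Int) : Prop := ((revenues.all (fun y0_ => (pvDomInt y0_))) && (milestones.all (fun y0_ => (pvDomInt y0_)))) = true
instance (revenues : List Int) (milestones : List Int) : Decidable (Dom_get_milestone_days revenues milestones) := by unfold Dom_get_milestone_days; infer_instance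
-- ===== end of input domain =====

-- B replaces A's sort + shared monotone milestone pointer with a running-max prefix-sum envelope and an independent binary search per milestone.


-- ===== PORT A =====
-- sorted([(m, i) for i, m in enumerate(milestones)]): indices are distinct and increasing,
-- so Python's lexicographic tuple sort equals the STABLE sort by the value component.
def pairsA (milestones : List Int) : List (Int × Nat) :=
  (PySem.List.enumerate milestones 0).map (fun p => (p.2, p.1.toNat))

-- the inner while loop: 'index' into the sorted list is modelled by its remaining suffix
def consumeA (rem : List (Int × Nat)) (s : Int) (day : Int) (res : List Int) :
    List (Int × Nat) × List Int :=
  match rem with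
  | [] => ([], res)
  | (m, i) :: rest =>
      if s ≥ m then consumeA rest s day (res.set i day) else ((m, i) :: rest, res)

-- the 'for day, revenue in enumerate(revenues)' loop, carrying (sum, day, result)
def loopA (revs : List Int) (rem : List (Int × Nat)) (s : Int) (day : Int)
    (res : List Int) : List Int :=
  match revs with
  | [] => res
  | rev :: rest =>
      let s' := s + rev
      let cr := consumeA rem s' (day + 1) res
      loopA rest cr.1 s' (day + 1) cr.2

def get_milestone_days (revenues : List Int) (milestones : List Int) : List Int :=
  loopA revenues (PySem.List.sorted (pairsA milestones) (fun p => p.1) false) 0 0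
    (List.replicate milestones.length 0)

-- ===== PORT B =====
-- hi = None initially; hi = max(hi, s) update
def newHi (hi : Option Int) (s' : Int) : Int :=
  match hi with
  | none => s'
  | some h => if s' > h then s' else h

-- the 'for r in revenues' loop building best (running max of prefix sums)
def envLoopB (revs : List Int) (s : Int) (hi : Option Int) (best : List Int) : List Int :=
  match revs with
  | [] => best
  | r :: rest =>
      envLoopB rest (s + r) (some (newHi hi (s + r))) (best ++ [newHi hi (s + r)])

-- the 'while lo < up' binary search; lo, up are nonnegative ints, so Nat '/' matches '//';
-- mid = (lo + up) // 2 is written inline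
def bsearchB (best : List Int) (m : Int) (lo up : Nat) : Nat :=
  if _h : lo < up then
    if PySem.List.pyGetD best (((lo + up) / 2 : Nat) : Int) 0 ≥ m then
      bsearchB best m lo ((lo + up) / 2)
    else bsearchB best m ((lo + up) / 2 + 1) up
  else lo
termination_by up - lo
decreasing_by all_goals omega

def get_milestone_days_alt (revenues : List Int) (milestones : List Int) : List Int :=
  let best := envLoopB revenues 0 none []
  milestones.map (fun m =>
    if best = [] ∨ PySem.List.pyGetD best (-1) 0 < m then (0 : Int)
    else ((bsearchB best m 0 (best.length - 1) : Int) + 1))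

-- ===== PRECONDITION & SPEC =====
def Spec_get_milestone_days (revenues : List Int) (milestones : List Int) (out : List Int) : Prop := out = get_milestone_days_alt revenues milestones
instance (revenues : List Int) (milestones : List Int) (out : List Int) : Decidable (Spec_get_milestone_days revenues milestones out) := by unfold Spec_get_milestone_days; infer_instance

-- ===== CLAIM (what is proved, stated in full; the proofs are below) =====
def Claim_equal_get_milestone_days : Prop := ∀ (revenues : List Int) (milestones : List Int), Dom_get_milestone_days revenues milestones → Spec_get_milestone_days revenues milestones (get_milestone_days revenues milestones)

-- ===== LEMMAS AND PROOFS =====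

-- ---- B-side proof helpers: per-milestone first-reach day, and a non-accumulator envelope ----
def firstDayB (revs : List Int) (m : Int) (s : Int) (day : Int) : Int :=
  match revs with
  | [] => 0
  | r :: rs => if s + r ≥ m then day else firstDayB rs m (s + r) (day + 1)

def envList (revs : List Int) (s : Int) (hi : Option Int) : List Int :=
  match revs with
  | [] => []
  | r :: rest => newHi hi (s + r) :: envList rest (s + r) (some (newHi hi (s + r)))


-- consumeA: takes the ≤ s prefix of the (value-)sorted remainder, stamping 'day' at its indices
lemma consumeA_spec (rem : List (Int × Nat)) (s day : Int) (res : List Int)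
    (hsorted : rem.Pairwise (fun a b => a.1 ≤ b.1))
    (hnodup : (rem.map (·.2)).Nodup)
    (hbound : ∀ p ∈ rem, p.2 < res.length) :
    (consumeA rem s day res).2.length = res.length ∧
    (consumeA rem s day res).1.Sublist rem ∧
    (∀ p ∈ (consumeA rem s day res).1, ¬ p.1 ≤ s) ∧
    (∀ p ∈ rem, ¬ p.1 ≤ s → p ∈ (consumeA rem s day res).1) ∧
    (∀ p ∈ rem, p.1 ≤ s → (consumeA rem s day res).2[p.2]? = some day) ∧
    (∀ j : Nat, (∀ p ∈ rem, p.1 ≤ s → p.2 ≠ j) →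
      (consumeA rem s day res).2[j]? = res[j]?) := by
  induction rem generalizing res with
  | nil => simp [consumeA]
  | cons hd tl ih =>
    obtain ⟨m, i⟩ := hd
    rw [List.pairwise_cons] at hsorted
    rw [List.map_cons, List.nodup_cons] at hnodup
    by_cases hms : s ≥ m
    · have hstep : consumeA ((m, i) :: tl) s day res = consumeA tl s day (res.set i day) := by
        simp [consumeA, hms]
      obtain ⟨l1, l2, l3, l4, l5, l6⟩ := ih (res.set i day) hsorted.2 hnodup.2
        (fun p hp => by simpa using hbound p (List.mem_cons_of_mem _ hp))
      rw [hstep]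
      refine ⟨by simpa using l1, (l2.trans (List.sublist_cons_self _ _)), l3, ?_, ?_, ?_⟩
      · intro p hp hps
        rcases List.mem_cons.1 hp with hp | hp
        · exact absurd (by simpa [hp] using hms) (by simpa [hp] using hps)
        · exact l4 p hp hps
      · intro p hp hps
        rcases List.mem_cons.1 hp with hp | hp
        · subst hp
          rw [l6 i ?_]
          · have hib : i < res.length := hbound (m, i) List.mem_cons_self
            simp [hib]
          · intro q hq _ hq2
            have hmem : q.2 ∈ tl.map (·.2) := List.mem_map_of_mem hq
            rw [hq2] at hmem
            exact hnodup.1 hmem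
        · exact l5 p hp hps
      · intro j hj
        rw [l6 j (fun q hq hq1 => hj q (List.mem_cons_of_mem _ hq) hq1)]
        have hij : i ≠ j := hj (m, i) List.mem_cons_self (by simpa using hms)
        simp [List.getElem?_set_ne hij]
    · have hstep : consumeA ((m, i) :: tl) s day res = ((m, i) :: tl, res) := by
        simp [consumeA, hms]
      rw [hstep]
      refine ⟨rfl, List.Sublist.refl _, ?_, fun p hp _ => hp, ?_, fun _ _ => rfl⟩
      · intro p hp
        rcases List.mem_cons.1 hp with hp | hp
        · simpa [hp] using hms
        · have := hsorted.1 p hp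
          simp only [ge_iff_le, not_le] at hms ⊢
          omega
      · intro p hp hps
        exfalso
        rcases List.mem_cons.1 hp with hp | hp
        · exact hms (by simpa [hp] using hps)
        · have := hsorted.1 p hp
          simp only [ge_iff_le, not_le] at hms
          omega

-- main loop invariant: each remaining milestone gets its independent first-reach day
lemma loopA_spec (revs : List Int) :
    ∀ (rem : List (Int × Nat)) (s day : Int) (res : List Int),
    rem.Pairwise (fun a b => a.1 ≤ b.1) →
    (rem.map (·.2)).Nodup →
    (∀ p ∈ rem, res[p.2]? = some 0) →
    (loopA revs rem s day res).length = res.length ∧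
    (∀ p ∈ rem, (loopA revs rem s day res)[p.2]? = some (firstDayB revs p.1 s (day + 1))) ∧
    (∀ j : Nat, j ∉ rem.map (·.2) → (loopA revs rem s day res)[j]? = res[j]?) := by
  induction revs with
  | nil =>
    intro rem s day res _ _ hzero
    refine ⟨rfl, ?_, fun _ _ => rfl⟩
    intro p hp
    simpa [firstDayB] using hzero p hp
  | cons rev rest ih =>
    intro rem s day res hsorted hnodup hzero
    have hbound : ∀ p ∈ rem, p.2 < res.length := by
      intro p hp
      obtain ⟨h, -⟩ := List.getElem?_eq_some_iff.1 (hzero p hp)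
      exact h
    obtain ⟨c1, c2, c3, c4, c5, c6⟩ := consumeA_spec rem (s + rev) (day + 1) res hsorted hnodup hbound
    set rem' := (consumeA rem (s + rev) (day + 1) res).1 with hrem'
    set res' := (consumeA rem (s + rev) (day + 1) res).2 with hres'
    have hsorted' : rem'.Pairwise (fun a b => a.1 ≤ b.1) := List.Pairwise.sublist c2 hsorted
    have hnodup' : (rem'.map (·.2)).Nodup := hnodup.sublist (c2.map _)
    have hinj : ∀ p ∈ rem, ∀ q ∈ rem, p.2 = q.2 → p = q := by
      intro p hp q hq hpq
      exact List.inj_on_of_nodup_map hnodup hp hq hpq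
    have hzero' : ∀ p ∈ rem', res'[p.2]? = some 0 := by
      intro p hp
      rw [c6 p.2 ?_]
      · exact hzero p (c2.mem hp)
      · intro q hq hqs hq2
        exact (c3 p hp) (hinj q hq p (c2.mem hp) hq2 ▸ hqs)
    obtain ⟨i1, i2, i3⟩ := ih rem' (s + rev) (day + 1) res' hsorted' hnodup' hzero'
    have hloop : loopA (rev :: rest) rem s day res =
        loopA rest rem' (s + rev) (day + 1) res' := rfl
    rw [hloop]
    refine ⟨i1.trans c1, ?_, ?_⟩
    · intro p hp
      by_cases hps : p.1 ≤ s + rev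
      · have hnot : p.2 ∉ rem'.map (·.2) := by
          intro hmem
          obtain ⟨q, hq, hq2⟩ := List.mem_map.1 hmem
          have := hinj q (c2.mem hq) p hp hq2
          exact (c3 q hq) (this ▸ hps)
        rw [i3 p.2 hnot, c5 p hp hps]
        simp [firstDayB, hps]
      · have hp' : p ∈ rem' := c4 p hp hps
        rw [i2 p hp']
        have : firstDayB (rev :: rest) p.1 s (day + 1) =
            firstDayB rest p.1 (s + rev) (day + 1 + 1) := by
          simp [firstDayB, hps]
        rw [this]
    · intro j hj
      have hj' : j ∉ rem'.map (·.2) := fun h => hj ((c2.map _).mem h)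
      rw [i3 j hj', c6 j ?_]
      intro q hq _ hq2
      exact hj (hq2 ▸ List.mem_map_of_mem hq)

-- indices in the enumerated pair list are exactly range milestones.length
lemma pairsA_map_snd (milestones : List Int) :
    ∀ s : Nat, ((PySem.List.enumerate milestones (s : Int)).map (fun p => p.1.toNat))
      = List.range' s milestones.length := by
  induction milestones with
  | nil => intro s; simp [PySem.List.enumerate_nil]
  | cons x xs ih =>
    intro s
    have := ih (s + 1)
    simp only [PySem.List.enumerate_cons, List.map_cons, List.length_cons, List.range'_succ]
    have hcast : ((s : Int) + 1) = ((s + 1 : Nat) : Int) := by push_cast; ring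
    rw [hcast, this]
    simp

lemma mem_pairsA (milestones : List Int) (p : Int × Nat) (hp : p ∈ pairsA milestones) :
    ∃ k : Nat, ∃ hk : k < milestones.length, p = (milestones[k], k) := by
  obtain ⟨q, hq, hq2⟩ := List.mem_map.1 hp
  obtain ⟨k, hk, hqe⟩ := (PySem.List.mem_enumerate_iff _ _ _).1 hq
  subst hqe hq2
  exact ⟨k, hk, by simp⟩

lemma pairsA_complete (milestones : List Int) (k : Nat) (hk : k < milestones.length) :
    (milestones[k], k) ∈ pairsA milestones := by
  have h1 : ((0 : Int) + k, milestones[k]) ∈ PySem.List.enumerate milestones 0 :=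
    (PySem.List.mem_enumerate_iff _ _ _).2 ⟨k, hk, rfl⟩
  have h2 := List.mem_map_of_mem (f := fun p => (p.2, p.1.toNat)) h1
  simp only [zero_add, Int.toNat_natCast] at h2
  simpa [pairsA] using h2

lemma newHi_ge_s (hi : Option Int) (s' : Int) : s' ≤ newHi hi s' := by
  cases hi with
  | none => simp [newHi]
  | some h => simp only [newHi]; split_ifs <;> omega

lemma newHi_lt (hi : Option Int) (s' m : Int) (hlt : ∀ h, hi = some h → h < m)
    (hs : s' < m) : newHi hi s' < m := by
  cases hi with
  | none => simpa [newHi] using hs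
  | some h => have := hlt h rfl; simp only [newHi]; split_ifs <;> omega

lemma envLoopB_eq (revs : List Int) :
    ∀ (s : Int) (hi : Option Int) (best : List Int),
    envLoopB revs s hi best = best ++ envList revs s hi := by
  induction revs with
  | nil => intro s hi best; simp [envLoopB, envList]
  | cons r rest ih => intro s hi best; simp [envLoopB, envList, ih]

lemma envList_length (revs : List Int) :
    ∀ (s : Int) (hi : Option Int), (envList revs s hi).length = revs.length := by
  induction revs with
  | nil => intro s hi; simp [envList]
  | cons r rest ih => intro s hi; simp [envList, ih]

lemma envList_lb (revs : List Int) :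
    ∀ (s h : Int) (k : Nat) (hk : k < (envList revs s (some h)).length),
    h ≤ (envList revs s (some h))[k] := by
  induction revs with
  | nil => intro s h k hk; simp [envList] at hk
  | cons r rest ih =>
    intro s h k hk
    match k with
    | 0 =>
      simp only [envList, List.getElem_cons_zero, newHi]
      split_ifs <;> omega
    | k + 1 =>
      simp only [envList, List.getElem_cons_succ]
      have h1 : h ≤ newHi (some h) (s + r) := by
        simp only [newHi]; split_ifs <;> omega
      exact le_trans h1 (ih (s + r) (newHi (some h) (s + r)) k
        (by simpa [envList] using hk))

lemma envList_mono (revs : List Int) :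
    ∀ (s : Int) (hi : Option Int) (j k : Nat)
      (hj : j < (envList revs s hi).length) (hk : k < (envList revs s hi).length),
    j ≤ k → (envList revs s hi)[j] ≤ (envList revs s hi)[k] := by
  induction revs with
  | nil => intro s hi j k hj _ _; simp [envList] at hj
  | cons r rest ih =>
    intro s hi j k hj hk hjk
    match j, k with
    | 0, 0 => exact le_refl _
    | 0, k + 1 =>
      simp only [envList, List.getElem_cons_zero, List.getElem_cons_succ]
      exact envList_lb rest (s + r) (newHi hi (s + r)) k (by simpa [envList] using hk)
    | j + 1, k + 1 =>
      simp only [envList, List.getElem_cons_succ]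
      exact ih (s + r) (some (newHi hi (s + r))) j k (by simpa [envList] using hj)
        (by simpa [envList] using hk) (by omega)

lemma firstDayB_lb (revs : List Int) :
    ∀ (m s d : Int), firstDayB revs m s d ≠ 0 → d ≤ firstDayB revs m s d := by
  induction revs with
  | nil => intro m s d h; simp [firstDayB] at h
  | cons r rest ih =>
    intro m s d h
    by_cases hms : s + r ≥ m
    · simp [firstDayB, hms]
    · rw [firstDayB] at h ⊢
      rw [if_neg hms] at h ⊢
      have := ih m (s + r) (d + 1) h
      omega

lemma firstDayB_ub (revs : List Int) :
    ∀ (m s d : Int), firstDayB revs m s d ≠ 0 →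
    firstDayB revs m s d ≤ d + revs.length - 1 := by
  induction revs with
  | nil => intro m s d h; simp [firstDayB] at h
  | cons r rest ih =>
    intro m s d h
    by_cases hms : s + r ≥ m
    · rw [firstDayB, if_pos hms]
      simp only [List.length_cons]
      push_cast
      omega
    · rw [firstDayB, if_neg hms] at h ⊢
      have := ih m (s + r) (d + 1) h
      simp only [List.length_cons] at *
      push_cast at this ⊢
      omega

-- best[k] ≥ m iff the milestone m is reached by day k+1 (given nothing before was ≥ m)
lemma envList_reach (m : Int) (revs : List Int) :
    ∀ (s : Int) (hi : Option Int) (d : Int), 1 ≤ d → (∀ h, hi = some h → h < m) →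
    ∀ (k : Nat) (hk : k < (envList revs s hi).length),
    (m ≤ (envList revs s hi)[k] ↔
      firstDayB revs m s d ≠ 0 ∧ firstDayB revs m s d ≤ d + (k : Int)) := by
  induction revs with
  | nil => intro s hi d _ _ k hk; simp [envList] at hk
  | cons r rest ih =>
    intro s hi d hd hlt k hk
    by_cases hms : s + r ≥ m
    · have hf : firstDayB (r :: rest) m s d = d := by rw [firstDayB, if_pos hms]
      rw [hf]
      have hge : m ≤ (envList (r :: rest) s hi)[k] := by
        match k with
        | 0 =>
          simp only [envList, List.getElem_cons_zero]
          exact le_trans hms (newHi_ge_s hi (s + r))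
        | k + 1 =>
          simp only [envList, List.getElem_cons_succ]
          refine le_trans (le_trans hms (newHi_ge_s hi (s + r))) ?_
          exact envList_lb rest (s + r) (newHi hi (s + r)) k (by simpa [envList] using hk)
      have hknn : (0 : Int) ≤ (k : Int) := by positivity
      simp only [hge, true_iff]
      exact ⟨by omega, by omega⟩
    · have hf : firstDayB (r :: rest) m s d = firstDayB rest m (s + r) (d + 1) := by
        rw [firstDayB, if_neg hms]
      have hhi' : newHi hi (s + r) < m := newHi_lt hi (s + r) m hlt (by omega)
      match k with
      | 0 =>
        simp only [envList, List.getElem_cons_zero, hf]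
        constructor
        · intro h; omega
        · rintro ⟨h0, hle⟩
          have := firstDayB_lb rest m (s + r) (d + 1) h0
          simp only [Nat.cast_zero] at hle
          omega
      | k + 1 =>
        rw [hf]
        have := ih (s + r) (some (newHi hi (s + r))) (d + 1) (by omega)
          (fun h hh => by cases hh; exact hhi') k (by simpa [envList] using hk)
        simp only [envList, List.getElem_cons_succ]
        rw [this]
        constructor
        · rintro ⟨h0, hle⟩; push_cast at hle ⊢; exact ⟨h0, by omega⟩
        · rintro ⟨h0, hle⟩; push_cast at hle ⊢; exact ⟨h0, by omega⟩

lemma bsearchB_correct (best : List Int) (m : Int)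
    (mono : ∀ (j k : Nat) (hj : j < best.length) (hk : k < best.length),
      j ≤ k → best[j] ≤ best[k]) :
    ∀ (fuel lo up : Nat), up - lo ≤ fuel → lo ≤ up → up < best.length →
    (∀ (j : Nat) (hj : j < best.length), j < lo → best[j] < m) →
    (∀ hu : up < best.length, m ≤ best[up]) →
    lo ≤ bsearchB best m lo up ∧ bsearchB best m lo up ≤ up ∧
    (∀ (j : Nat) (hj : j < best.length), j < bsearchB best m lo up → best[j] < m) ∧
    (∀ hr : bsearchB best m lo up < best.length, m ≤ best[bsearchB best m lo up]) := by
  intro fuel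
  induction fuel with
  | zero =>
    intro lo up hf hlu hup hlow hhigh
    have heq : lo = up := by omega
    subst heq
    rw [bsearchB, dif_neg (by omega)]
    exact ⟨le_refl _, le_refl _, hlow, fun hr => hhigh hr⟩
  | succ f ihf =>
    intro lo up hf hlu hup hlow hhigh
    by_cases hlt : lo < up
    · rw [bsearchB, dif_pos hlt]
      have hmlo : lo ≤ (lo + up) / 2 := by omega
      have hmup : (lo + up) / 2 < up := by omega
      have hmlen : (lo + up) / 2 < best.length := by omega
      rw [PySem.List.pyGetD_natCast, List.getD_eq_getElem best 0 hmlen]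
      by_cases hcond : best[(lo + up) / 2] ≥ m
      · rw [if_pos hcond]
        obtain ⟨a, b, c, dd⟩ := ihf lo ((lo + up) / 2) (by omega) hmlo hmlen hlow
          (fun _ => hcond)
        exact ⟨a, by omega, c, dd⟩
      · rw [if_neg hcond]
        have hlow' : ∀ (j : Nat) (hj : j < best.length), j < (lo + up) / 2 + 1 →
            best[j] < m := by
          intro j hj hjm
          have h1 := mono j ((lo + up) / 2) hj hmlen (by omega)
          omega
        obtain ⟨a, b, c, dd⟩ := ihf ((lo + up) / 2 + 1) up (by omega) (by omega) hup
          hlow' hhigh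
        exact ⟨by omega, b, c, dd⟩
    · rw [bsearchB, dif_neg hlt]
      have heq : lo = up := by omega
      subst heq
      exact ⟨le_refl _, le_refl _, hlow, fun hr => hhigh hr⟩

lemma pyGetD_neg_one (xs : List Int) (h : xs ≠ []) :
    PySem.List.pyGetD xs (-1) 0 =
      xs[xs.length - 1]'(by have := List.length_pos_of_ne_nil h; omega) := by
  have h1 : 1 ≤ xs.length := List.length_pos_of_ne_nil h
  simp only [PySem.List.pyGetD, PySem.List.pyGet?, PySem.List.pyIdx?]
  norm_num [h1]
  rw [List.getElem?_eq_getElem (by omega : xs.length - 1 < xs.length)]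
  rfl

-- one milestone: the envelope + binary search computes the first-reach day
lemma perM (revs : List Int) (m : Int) :
    (if envList revs 0 none = [] ∨ PySem.List.pyGetD (envList revs 0 none) (-1) 0 < m
     then (0 : Int)
     else ((bsearchB (envList revs 0 none) m 0 ((envList revs 0 none).length - 1) : Int) + 1))
    = firstDayB revs m 0 1 := by
  by_cases hnil : envList revs 0 none = []
  · rw [if_pos (Or.inl hnil)]
    have hrev : revs = [] := by
      have := envList_length revs 0 none
      rw [hnil] at this
      exact List.eq_nil_of_length_eq_zero this.symm
    rw [hrev]; rfl
  · have hlen : 0 < (envList revs 0 none).length := List.length_pos_of_ne_nil hnil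
    have hlast := pyGetD_neg_one (envList revs 0 none) hnil
    have hreach := envList_reach m revs 0 none 1 (le_refl 1) (by simp)
    have hub' : firstDayB revs m 0 1 ≠ 0 → firstDayB revs m 0 1 ≤ revs.length := by
      intro h
      have := firstDayB_ub revs m 0 1 h
      omega
    have hnlen : (envList revs 0 none).length = revs.length := envList_length revs 0 none
    have hlastiff : m ≤ (envList revs 0 none)[(envList revs 0 none).length - 1]'(by omega) ↔
        firstDayB revs m 0 1 ≠ 0 := by
      constructor
      · intro h; exact ((hreach _ (by omega)).1 h).1
      · intro h
        refine (hreach _ (by omega)).2 ⟨h, ?_⟩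
        have h1 := hub' h
        have h2 : (((envList revs 0 none).length - 1 : Nat) : Int) =
            ((envList revs 0 none).length : Int) - 1 := by
          omega
        rw [h2, hnlen]
        omega
    by_cases hm : m ≤ (envList revs 0 none)[(envList revs 0 none).length - 1]'(by omega)
    · rw [if_neg (by rw [hlast]; push Not; exact ⟨hnil, hm⟩)]
      have mono := envList_mono revs 0 none
      obtain ⟨ha, hb, hc, hd⟩ := bsearchB_correct (envList revs 0 none) m mono
        ((envList revs 0 none).length - 1) 0 ((envList revs 0 none).length - 1)
        (le_refl _) (by omega) (by omega)
        (fun j hj hj0 => absurd hj0 (Nat.not_lt_zero j)) (fun _ => hm)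
      have hrlen : bsearchB (envList revs 0 none) m 0 ((envList revs 0 none).length - 1) <
          (envList revs 0 none).length := by omega
      obtain ⟨hf0, hfle⟩ := (hreach _ hrlen).1 (hd hrlen)
      have hgt : (bsearchB (envList revs 0 none) m 0 ((envList revs 0 none).length - 1) : Int)
          < firstDayB revs m 0 1 := by
        cases hr : bsearchB (envList revs 0 none) m 0 ((envList revs 0 none).length - 1) with
        | zero =>
          have := firstDayB_lb revs m 0 1 hf0
          simp only [Nat.cast_zero]
          omega
        | succ rr =>
          have hltm := hc rr (by omega) (by omega)
          have hiff := hreach rr (by omega)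
          have hnot : ¬ (firstDayB revs m 0 1 ≠ 0 ∧
              firstDayB revs m 0 1 ≤ 1 + (rr : Int)) := by
            rw [← hiff]; omega
          push_cast
          omega
      omega
    · rw [if_pos (Or.inr (by rw [hlast]; omega))]
      have : firstDayB revs m 0 1 = 0 := by
        by_contra h
        exact hm (hlastiff.2 h)
      omega

-- B computes the per-milestone first-reach map
lemma B_eq_first (revenues milestones : List Int) :
    get_milestone_days_alt revenues milestones =
      milestones.map (fun m => firstDayB revenues m 0 1) := by
  unfold get_milestone_days_alt
  rw [envLoopB_eq, List.nil_append]
  exact List.map_congr_left (fun m _ => perM revenues m)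

-- ===== VERDICT (by name: the statement is the Claim_ definition above) =====
theorem get_milestone_days_spec : Claim_equal_get_milestone_days := by
  intro revenues milestones _
  unfold Spec_get_milestone_days get_milestone_days
  rw [B_eq_first]
  set sm := PySem.List.sorted (pairsA milestones) (fun p => p.1) false with hsm
  have hperm : sm.Perm (pairsA milestones) := PySem.List.sorted_perm _ _ _
  have hsorted : sm.Pairwise (fun a b => a.1 ≤ b.1) := PySem.List.sorted_pairwise _ _
  have hnodup : (sm.map (·.2)).Nodup := by
    have h0 : ((pairsA milestones).map (·.2)).Nodup := by
      have : (pairsA milestones).map (·.2)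
          = (PySem.List.enumerate milestones (0 : Int)).map (fun p => p.1.toNat) := by
        simp [pairsA, List.map_map]
      rw [this]
      have := pairsA_map_snd milestones 0
      simp only [Nat.cast_zero] at this
      rw [this]
      exact List.nodup_range'
    exact ((hperm.map _).nodup_iff).2 h0
  have hzero : ∀ p ∈ sm, (List.replicate milestones.length (0 : Int))[p.2]? = some 0 := by
    intro p hp
    obtain ⟨k, hk, hpe⟩ := mem_pairsA milestones p (hperm.mem_iff.1 hp)
    subst hpe
    simp [hk]
  obtain ⟨l1, l2, l3⟩ := loopA_spec revenues sm 0 0 (List.replicate milestones.length 0)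
    hsorted hnodup hzero
  apply List.ext_getElem?
  intro j
  by_cases hj : j < milestones.length
  · have hmem : (milestones[j], j) ∈ sm := hperm.mem_iff.2 (pairsA_complete milestones j hj)
    have := l2 (milestones[j], j) hmem
    simp only at this
    rw [this]
    simp [hj]
  · rw [List.getElem?_eq_none (by simpa [l1] using Nat.le_of_not_lt hj),
        List.getElem?_eq_none (by simpa using Nat.le_of_not_lt hj)]
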